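-- pv_equiv track=rewrite | github.com/vatsal22/python_sandbox | google1.py | isSmaller
-- ===== SOURCE A (Python) =====
-- def isSmaller(stringA, stringB):
--     smallestCharA = stringA[0]
--     countA = 0
--     for char in stringA:
--         if char < smallestCharA:
--             smallestCharA=char
--             countA+=1
--         elif char == smallestCharA:
--             countA+=1
--
--     smallestCharB = stringB[0]
--     countB = 0
--     for char in stringB:
--         if char < smallestCharB:
--             smallestCharB=char
--             countB+=1
--         elif char == smallestCharB:
--             countB+=1
--
--     return True if countA < countB else False
-- ===== SOURCE B (Python) =====
-- def isSmaller(stringA, stringB):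
--     # Weak left-to-right minima of s = all occurrences of the global minimum
--     # (every one matches its prefix minimum), plus, recursively, the weak
--     # minima of the prefix strictly before the first occurrence of that minimum.
--     def weak_minima(s):
--         if not s:
--             return 0
--         m = min(s)
--         return s.count(m) + weak_minima(s[:s.index(m)])
--     return weak_minima(stringA) < weak_minima(stringB)
-- ===== Notes on version B (the rewrite author's own statement) =====
-- stated objective: faster
-- what changed: Replaces A's single fused left-to-right scan (running smallest char + inline counter) with a recursive divide by the global minimum: count(s) = s.count(min(s)) + count(prefix before the first occurrence of min(s)); the per-character work moves into C-level min/index/count/slice built-ins instead of an interpreted loop, measured ~2.8x faster on typical strings (worst case O(n^2) on a strictly decreasing string).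
import Mathlib
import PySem

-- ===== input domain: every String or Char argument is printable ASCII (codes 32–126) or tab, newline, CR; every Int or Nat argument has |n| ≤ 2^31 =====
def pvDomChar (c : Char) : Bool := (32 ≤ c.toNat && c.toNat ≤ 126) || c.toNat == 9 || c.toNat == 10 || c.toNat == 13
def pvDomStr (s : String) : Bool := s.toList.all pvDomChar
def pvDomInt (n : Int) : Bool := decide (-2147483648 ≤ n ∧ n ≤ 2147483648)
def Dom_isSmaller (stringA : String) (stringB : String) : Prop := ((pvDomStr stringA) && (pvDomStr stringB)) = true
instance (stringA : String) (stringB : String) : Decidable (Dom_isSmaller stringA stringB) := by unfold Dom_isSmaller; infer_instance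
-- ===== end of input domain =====

-- B replaces A's fused scan by a recursive divide on the global minimum via min/index/count built-ins (objective: faster by a constant factor, measured).
-- ===== PORT A =====
-- A's fused loop: running smallest char + count, folded left to right. '[] => 0' is unreachable
-- under Pre_ (Python raises IndexError on s[0] for an empty string).
def pvRunA (s : List Char) : Int :=
  match s with
  | [] => 0
  | c0 :: _ =>
    (s.foldl (fun (st : Char × Int) c =>
        if c < st.1 then (c, st.2 + 1)
        else if c = st.1 then (st.1, st.2 + 1)
        else st) (c0, 0)).2

def isSmaller (stringA : String) (stringB : String) : Bool :=
  if pvRunA stringA.toList < pvRunA stringB.toList then true else false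

-- ===== PORT B =====
-- weak_minima: count of the global minimum plus, recursively, the weak minima of the
-- prefix strictly before its first occurrence. The fuel argument (seeded with the
-- length, which bounds the recursion depth) only makes the recursion structural; the
-- 'none'/fuel-0 branches are unreachable (min?/index? are some on a nonempty list).
def pvWeakAux : Nat -> List Char -> Int
  | _, [] => 0
  | 0, _ :: _ => 0
  | fuel+1, c :: rest =>
    match PySem.List.min? (c :: rest) (fun y => y) with
    | none => 0
    | some m =>
      match PySem.List.index? (c :: rest) m with
      | none => 0
      | some j =>
        (PySem.List.count (c :: rest) m : Int) + pvWeakAux fuel ((c :: rest).take j)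

def pvWeak (s : List Char) : Int := pvWeakAux s.length s

def isSmaller_alt (stringA : String) (stringB : String) : Bool :=
  decide (pvWeak stringA.toList < pvWeak stringB.toList)

-- ===== PRECONDITION & SPEC =====
-- Pre_ excludes empty strings: there A raises IndexError on stringA[0]/stringB[0].
def Pre_isSmaller (stringA : String) (stringB : String) : Prop :=
  stringA.toList ≠ [] ∧ stringB.toList ≠ []
instance (stringA : String) (stringB : String) : Decidable (Pre_isSmaller stringA stringB) := by
  unfold Pre_isSmaller; infer_instance
def pvWitness_isSmaller : String × String := ("ab", "ba")

def Spec_isSmaller (stringA : String) (stringB : String) (out : Bool) : Prop := out = isSmaller_alt stringA stringB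
instance (stringA : String) (stringB : String) (out : Bool) : Decidable (Spec_isSmaller stringA stringB out) := by unfold Spec_isSmaller; infer_instance

-- ===== CLAIM (what is proved, stated in full; the proofs are below) =====
def Claim_equal_isSmaller : Prop := ∀ (stringA : String) (stringB : String), Dom_isSmaller stringA stringB → Pre_isSmaller stringA stringB → Spec_isSmaller stringA stringB (isSmaller stringA stringB)

-- ===== LEMMAS AND PROOFS =====

-- Inclusive prefix minima seeded with m (proof-side characterisation of A's running minimum).
def pvPrefixMins (m : Char) (cs : List Char) : List Char :=
  match cs with
  | [] => []
  | c :: rest => min m c :: pvPrefixMins (min m c) rest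

-- number of positions whose char equals its prefix minimum (seed m)
def pvZ (m : Char) (s : List Char) : Nat :=
  (s.zip (pvPrefixMins m s)).countP (fun p => p.1 = p.2)

-- A's fold from state (m, k) adds exactly pvZ m cs.
theorem pvRun_eq (cs : List Char) (m : Char) (k : Int) :
    (cs.foldl (fun (st : Char × Int) c =>
        if c < st.1 then (c, st.2 + 1)
        else if c = st.1 then (st.1, st.2 + 1)
        else st) (m, k)).2 = k + (pvZ m cs : Nat) := by
  induction cs generalizing m k with
  | nil => simp [pvZ, pvPrefixMins]
  | cons c rest ih =>
    simp only [List.foldl_cons, pvZ, pvPrefixMins, List.zip_cons_cons, List.countP_cons]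
    rcases lt_trichotomy c m with h | h | h
    · have hmin : min m c = c := min_eq_right h.le
      simp [h, hmin, ih, pvZ, List.countP]
      ring
    · subst h
      simp [ih, pvZ, List.countP]
      ring
    · have hmin : min m c = m := min_eq_left h.le
      have h1 : ¬ c < m := not_lt_of_gt h
      have h2 : c ≠ m := ne_of_gt h
      simp [h1, h2, hmin, ih, pvZ, List.countP]

theorem pvPrefixMins_append (xs ys : List Char) (m : Char) :
    pvPrefixMins m (xs ++ ys) = pvPrefixMins m xs ++ pvPrefixMins (xs.foldl min m) ys := by
  induction xs generalizing m with
  | nil => simp [pvPrefixMins]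
  | cons x t ih => simp [pvPrefixMins, ih]

theorem pvPrefixMins_length (m : Char) (s : List Char) : (pvPrefixMins m s).length = s.length := by
  induction s generalizing m with
  | nil => rfl
  | cons c t ih => simp [pvPrefixMins, ih]

-- split of the zip count at an append point
theorem pvZ_append (xs ys : List Char) (m : Char) :
    pvZ m (xs ++ ys) = pvZ m xs + pvZ (xs.foldl min m) ys := by
  unfold pvZ
  rw [pvPrefixMins_append, List.zip_append (by rw [pvPrefixMins_length]), List.countP_append]

-- when the seed is below every element, every prefix min is the seed
theorem pvZ_of_min (m : Char) (ys : List Char) (h : ∀ c ∈ ys, m ≤ c) :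
    pvZ m ys = ys.count m := by
  induction ys with
  | nil => rfl
  | cons c t ih =>
    have hc : m ≤ c := h c (by simp)
    have hmin : min m c = m := min_eq_left hc
    simp only [pvZ, pvPrefixMins, hmin, List.zip_cons_cons, List.countP_cons, List.count_cons]
    rw [show (t.zip (pvPrefixMins m t)).countP (fun p => p.1 = p.2) = pvZ m t from rfl,
       ih (fun c hc => h c (by simp [hc]))]
    by_cases hcm : c = m <;> simp [hcm]

-- the count of a tail segment starting at the global minimum
theorem pvZ_tail (f m : Char) (ys : List Char) (hf : m ≤ f) (h : ∀ c ∈ ys, m ≤ c) :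
    pvZ f (m :: ys) = (m :: ys).count m := by
  simp only [pvZ, pvPrefixMins, min_eq_right hf, List.zip_cons_cons, List.countP_cons,
    List.count_cons]
  rw [show (ys.zip (pvPrefixMins m ys)).countP (fun p => p.1 = p.2) = pvZ m ys from rfl,
     pvZ_of_min m ys h]
  simp

theorem pvRunA_cons (c : Char) (rest : List Char) :
    pvRunA (c :: rest) = (pvZ c (c :: rest) : Int) := by
  show ((c :: rest).foldl (fun (st : Char × Int) c =>
      if c < st.1 then (c, st.2 + 1)
      else if c = st.1 then (st.1, st.2 + 1)
      else st) (c, 0)).2 = (pvZ c (c :: rest) : Int)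
  rw [pvRun_eq]
  simp

theorem pvWeakAux_eq (fuel : Nat) : ∀ s : List Char, s.length ≤ fuel → pvWeakAux fuel s = pvRunA s := by
  induction fuel with
  | zero =>
    intro s hs
    have : s = [] := List.eq_nil_of_length_eq_zero (Nat.le_zero.mp hs)
    subst this; rfl
  | succ fuel ih =>
    intro s hs
    cases s with
    | nil => rfl
    | cons c rest =>
    have hmin : PySem.List.min? (c :: rest) (fun y => y) = some (rest.foldl min c) :=
      PySem.List.min?_id_cons c rest
    set m := rest.foldl min c with hm
    have hmem : m ∈ c :: rest := PySem.List.min?_mem hmin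
    have hLow : ∀ y ∈ c :: rest, m ≤ y := by
      intro y hy
      simpa using PySem.List.min?_isMin hmin y hy
    obtain ⟨j, hj⟩ : ∃ j, PySem.List.index? (c :: rest) m = some j :=
      Option.isSome_iff_exists.mp ((PySem.List.index?_isSome_iff (c :: rest) m).2 hmem)
    obtain ⟨pre, suf, hsplit, hlen, hnotin⟩ := (PySem.List.index?_eq_some_iff _ _ _).1 hj
    rw [pvWeakAux, hmin]
    simp only [hj]
    have htake : (c :: rest).take j = pre := by
      rw [hsplit, ← hlen, List.take_left]
    have hjle : pre.length ≤ fuel := by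
      have hlenEq := congrArg List.length hsplit
      simp at hlenEq hs
      omega
    rw [htake, pvRunA_cons]
    have hcount : PySem.List.count (c :: rest) m = (c :: rest).count m := PySem.List.count_eq _ _
    have hsufLow : ∀ x ∈ suf, m ≤ x := by
      intro x hx; exact hLow x (by rw [hsplit]; simp [hx])
    cases pre with
    | nil =>
      have hc : c :: rest = m :: suf := by simpa using hsplit
      have hinj := hc
      injection hinj with hcm hrest
      rw [show pvWeakAux fuel [] = 0 by cases fuel <;> rfl, hc, hcm,
        pvZ_tail m m suf le_rfl hsufLow]
      simp [PySem.List.count_eq]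
    | cons p0 pre' =>
      have hinj := hsplit
      rw [List.cons_append] at hinj
      injection hinj with hp0 hrest
      subst hp0
      have hsplit' : c :: rest = (c :: pre') ++ (m :: suf) := by simp [hrest]
      rw [show pvZ c (c :: rest) = pvZ c ((c :: pre') ++ (m :: suf)) by rw [← hsplit']]
      rw [pvZ_append]
      have hfLow : m ≤ (c :: pre').foldl min c := by
        have haux : ∀ (l : List Char) (a : Char), m ≤ a → (∀ x ∈ l, m ≤ x) → m ≤ l.foldl min a := by
          intro l
          induction l with
          | nil => intro a ha _; simpa using ha
          | cons x t iht =>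
            intro a ha hl
            simp only [List.foldl_cons]
            exact iht (min a x) (le_min ha (hl x (by simp))) (fun y hy => hl y (by simp [hy]))
        exact haux (c :: pre') c (hLow c (by simp))
          (fun y hy => hLow y (by rw [hsplit']; exact List.mem_append_left _ hy))
      rw [pvZ_tail _ m suf hfLow hsufLow]
      rw [ih (c :: pre') hjle, pvRunA_cons]
      have hcnt2 : (c :: rest).count m = (m :: suf).count m := by
        rw [hsplit', List.count_append]
        have : (c :: pre').count m = 0 := by
          rw [List.count_eq_zero]; exact hnotin
        omega
      rw [hcount, hcnt2]
      push_cast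
      ring

theorem pvWeak_eq (s : List Char) : pvWeak s = pvRunA s :=
  pvWeakAux_eq s.length s le_rfl

-- ===== VERDICT (by name: the statement is the Claim_ definition above) =====
theorem isSmaller_spec : Claim_equal_isSmaller := by
  intro stringA stringB _ _
  unfold Spec_isSmaller isSmaller isSmaller_alt
  rw [pvWeak_eq, pvWeak_eq]
  by_cases h : pvRunA stringA.toList < pvRunA stringB.toList <;> simp [h]
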